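-- pv_equiv track=rewrite | github.com/spenpal/advent-of-code | src/2024/d07.py | part2
-- ===== SOURCE A (Python) =====
-- from collections import deque
--
-- def part2(equations: list[tuple[tuple[int, ...], int]]) -> int:
--     total = 0
--
--     for nums, target in equations:
--         queue = deque([(nums[0], nums[1:])])
--         while queue:
--             res, remainder_nums = queue.popleft()
--             if not remainder_nums:
--                 if res == target:
--                     total += target
--                     break
--                 continue
--
--             next_num = remainder_nums[0]
--             add, mul, concat = (res + next_num, res * next_num, int(str(res) + str(next_num)))
--
--             if add <= target:
--                 queue.append((add, remainder_nums[1:]))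
--             if mul <= target:
--                 queue.append((mul, remainder_nums[1:]))
--             if concat <= target:
--                 queue.append((concat, remainder_nums[1:]))
--
--     return total
-- ===== SOURCE B (Python) =====
-- def _reach(res, rest, target):
--     if not rest:
--         return res == target
--     n = rest[0]
--     return any(
--         v <= target and _reach(v, rest[1:], target)
--         for v in (res + n, res * n, int(str(res) + str(n)))
--     )
--
--
-- def part2(equations):
--     total = 0
--     for nums, target in equations:
--         if _reach(nums[0], nums[1:], target):
--             total += target
--     return total
-- ===== Notes on version B (the rewrite author's own statement) =====
-- stated objective: simpler
-- what changed: Replaced the explicit deque-based breadth-first queue loop (with a break on success) by a short-circuiting recursive depth-first search over the suffix of numbers; the queue, the popleft/append bookkeeping and the break disappear.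
-- outside the precondition, e.g. on part2([((10, 100, -1), 5)]): A returns 0, B returns 0; on part2([((5, -3), 100)]): A raises ValueError, B raises ValueError
import Mathlib
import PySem

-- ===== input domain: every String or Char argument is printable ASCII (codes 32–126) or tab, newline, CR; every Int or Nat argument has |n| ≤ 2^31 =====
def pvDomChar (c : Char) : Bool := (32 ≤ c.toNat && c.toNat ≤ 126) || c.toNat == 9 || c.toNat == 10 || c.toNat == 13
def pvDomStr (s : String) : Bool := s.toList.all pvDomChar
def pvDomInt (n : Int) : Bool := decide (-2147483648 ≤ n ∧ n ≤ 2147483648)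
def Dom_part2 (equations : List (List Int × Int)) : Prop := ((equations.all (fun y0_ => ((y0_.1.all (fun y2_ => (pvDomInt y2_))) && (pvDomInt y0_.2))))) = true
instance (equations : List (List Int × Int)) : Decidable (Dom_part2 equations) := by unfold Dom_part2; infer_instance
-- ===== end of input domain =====

-- B replaces A's explicit deque breadth-first loop by a short-circuiting recursive
-- depth-first search over the remaining numbers (objective: simpler).

-- shared helper: int(str(res) + str(n)), as both Pythons write it (some-valued inside Pre_)
def pvCat (res n : Int) : Int :=
  (PySem.Int.ofChars? (PySem.Int.toChars res ++ PySem.Int.toChars n)).getD 0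

-- ===== PORT A =====
-- weight of a queue entry / queue, used only for termination of the while-loop recursion
def pvWeight (s : Int × List Int) : Nat := 2 * 3 ^ s.2.length - 1
def pvQW (q : List (Int × List Int)) : Nat := (q.map pvWeight).sum

-- the `while queue:` loop of A; returns whether the `break` (res == target on an
-- exhausted remainder) was reached
def pvBFS (target : Int) (queue : List (Int × List Int)) : Bool :=
  match queue with
  | [] => false
  | (res, rem) :: q =>
    match rem with
    | [] => if res == target then true else pvBFS target q
    | n :: rest =>
      let add := res + n
      let mul := res * n
      let cat := pvCat res n
      pvBFS target (q ++ ((if add ≤ target then [(add, rest)] else []) ++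
                          (if mul ≤ target then [(mul, rest)] else []) ++
                          (if cat ≤ target then [(cat, rest)] else [])))
termination_by pvQW queue
decreasing_by
  · simp [pvQW, pvWeight]
  · have h1 : 1 ≤ 3 ^ rest.length := Nat.one_le_pow _ _ (by norm_num)
    simp only [pvQW, List.map_append, List.sum_append, List.map_cons, List.sum_cons,
      pvWeight, List.length_cons, pow_succ]
    split_ifs <;> simp [pvWeight] <;> omega

def part2 (equations : List (List Int × Int)) : Int :=
  equations.foldl (fun total eq =>
    let nums := eq.1
    let target := eq.2
    if pvBFS target [((PySem.List.pyGet? nums 0).getD 0, PySem.List.slice nums (some 1) none)]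
    then total + target else total) 0

-- ===== PORT B =====
def pvReach (target res : Int) (rest : List Int) : Bool :=
  match rest with
  | [] => res == target
  | n :: rest' =>
    [res + n, res * n, pvCat res n].any (fun v => decide (v ≤ target) && pvReach target v rest')

def part2_alt (equations : List (List Int × Int)) : Int :=
  equations.foldl (fun total eq =>
    if pvReach eq.2 ((PySem.List.pyGet? eq.1 0).getD 0) (PySem.List.slice eq.1 (some 1) none)
    then total + eq.2 else total) 0

-- ===== PRECONDITION & SPEC =====
-- Pre_ excludes equations whose nums list is empty (A raises IndexError on nums[0]) and,
-- conservatively, those with a negative number after the first (A's int(str(res)+str(n))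
-- raises ValueError whenever such a number is reached; on the few such inputs where
-- pruning keeps A from reaching it, A still returns — see the cites).
def Pre_part2 (equations : List (List Int × Int)) : Prop :=
  ∀ eq ∈ equations, eq.1 ≠ [] ∧ ∀ n ∈ eq.1.tail, 0 ≤ n
instance (equations : List (List Int × Int)) : Decidable (Pre_part2 equations) := by
  unfold Pre_part2; infer_instance
def pvWitness_part2 : (List (List Int × Int)) := [([2, 3], 6), ([81, 40, 27], 3267)]

def Spec_part2 (equations : List (List Int × Int)) (out : Int) : Prop := out = part2_alt equations
instance (equations : List (List Int × Int)) (out : Int) : Decidable (Spec_part2 equations out) := by unfold Spec_part2; infer_instance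

-- ===== CLAIM (what is proved, stated in full; the proofs are below) =====
def Claim_equal_part2 : Prop := ∀ (equations : List (List Int × Int)), Dom_part2 equations → Pre_part2 equations → Spec_part2 equations (part2 equations)

-- ===== LEMMAS AND PROOFS =====

-- A's BFS loop succeeds iff some queue entry can reach the target (B's DFS predicate)
theorem pvBFS_eq_any (target : Int) (q : List (Int × List Int)) :
    pvBFS target q = q.any (fun s => pvReach target s.1 s.2) := by
  induction q using pvBFS.induct (target := target) with
  | case1 => simp [pvBFS]
  | case2 res q h => simp [pvBFS, pvReach, h]
  | case3 res q h ih => simp [pvBFS, pvReach, h, ih]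
  | case4 res q n rest add mul cat ih =>
      have ih' : pvBFS target
          (q ++ (((if res + n ≤ target then [(res + n, rest)] else []) ++
                  (if res * n ≤ target then [(res * n, rest)] else [])) ++
                 (if pvCat res n ≤ target then [(pvCat res n, rest)] else []))) =
          (q ++ (((if res + n ≤ target then [(res + n, rest)] else []) ++
                  (if res * n ≤ target then [(res * n, rest)] else [])) ++
                 (if pvCat res n ≤ target then [(pvCat res n, rest)] else []))).any
            (fun s => pvReach target s.1 s.2) := ih
      rw [pvBFS, ih']
      rw [List.any_append, List.any_cons]
      conv_rhs => rw [pvReach]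
      simp only [List.any_cons, List.any_nil]
      clear ih ih'
      split_ifs <;>
        simp [*, Bool.or_comm, Bool.or_left_comm, Bool.or_assoc]

theorem part2_fold_eq (equations : List (List Int × Int)) :
    ∀ total : Int,
      equations.foldl (fun total eq =>
        let nums := eq.1
        let target := eq.2
        if pvBFS target [((PySem.List.pyGet? nums 0).getD 0, PySem.List.slice nums (some 1) none)]
        then total + target else total) total =
      equations.foldl (fun total eq =>
        if pvReach eq.2 ((PySem.List.pyGet? eq.1 0).getD 0) (PySem.List.slice eq.1 (some 1) none)
        then total + eq.2 else total) total := by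
  induction equations with
  | nil => intro total; rfl
  | cons eq rest ih =>
      intro total
      simp only [List.foldl_cons, pvBFS_eq_any, List.any_cons, List.any_nil, Bool.or_false]

theorem part2_eq_alt (equations : List (List Int × Int)) :
    part2 equations = part2_alt equations := by
  unfold part2 part2_alt
  exact part2_fold_eq equations 0

-- ===== VERDICT (by name: the statement is the Claim_ definition above) =====
theorem part2_spec : Claim_equal_part2 := by
  intro equations _ _
  unfold Spec_part2
  exact part2_eq_alt equations
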